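-- pv_equiv track=rewrite | github.com/jaaamessszzz/dnassembly | dnassembly/reactions/PartDesigner/GGfrag.py | _merge_single_bases
-- ===== SOURCE A (Python) =====
-- def _merge_single_bases(subseqs):
--     new = []
--     curr = ""
--     for each in subseqs:
--         if len(each) == 1:
--             curr += each
--         else:
--             if curr != "":
--                 new.append(curr.lower())
--             new.append(each)
--             curr = ""
--     if curr != "":
--         new.append(curr.lower())
--     return new
-- ===== SOURCE B (Python) =====
-- def _run_end(subseqs, j):
--     while j < len(subseqs) and len(subseqs[j]) == 1:
--         j += 1
--     return j
--
--
-- def _merge_single_bases(subseqs):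
--     new = []
--     i = 0
--     while i < len(subseqs):
--         s = subseqs[i]
--         if len(s) == 1:
--             j = _run_end(subseqs, i + 1)
--             new.append(''.join(subseqs[i:j]).lower())
--             i = j
--         else:
--             new.append(s)
--             i += 1
--     return new
-- ===== Notes on version B (the rewrite author's own statement) =====
-- stated objective: alternative
-- what changed: Replaces A's running-string accumulator with trailing flush by a two-pointer scan that finds each maximal run of single-character elements and emits it joined and lowercased in one step.
import Mathlib
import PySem

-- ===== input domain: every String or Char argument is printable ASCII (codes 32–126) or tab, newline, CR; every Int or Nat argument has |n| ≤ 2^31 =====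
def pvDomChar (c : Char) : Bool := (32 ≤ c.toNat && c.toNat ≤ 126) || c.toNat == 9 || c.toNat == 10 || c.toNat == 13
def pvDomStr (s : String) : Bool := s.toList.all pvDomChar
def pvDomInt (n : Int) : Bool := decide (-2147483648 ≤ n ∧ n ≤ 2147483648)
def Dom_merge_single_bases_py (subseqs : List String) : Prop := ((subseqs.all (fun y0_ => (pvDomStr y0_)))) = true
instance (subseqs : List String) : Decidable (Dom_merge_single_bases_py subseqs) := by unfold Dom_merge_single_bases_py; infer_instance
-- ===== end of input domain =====

-- B replaces A's running-string accumulator and trailing flush by a two-pointer scan that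
-- locates each maximal run of single-character elements and emits it (joined, lowercased) at once;
-- objective: alternative decomposition, same O(n) cost.

-- ===== PORT A =====
-- literal port of A: fold over the elements carrying (new, curr), then the trailing flush
def merge_single_bases_py (subseqs : List String) : List String :=
  let st := subseqs.foldl
    (fun (st : List String × String) each =>
      if PySem.Str.len each == 1 then (st.1, st.2 ++ each)
      else (((if st.2 ≠ "" then st.1 ++ [PySem.Str.lower st.2] else st.1) ++ [each]), ""))
    ([], "")
  if st.2 ≠ "" then st.1 ++ [PySem.Str.lower st.2] else st.1

-- ===== PORT B =====
-- port of Source B's _run_end: advance j while it points at a single-character element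
def run_end (subseqs : List String) (j : Nat) : Nat :=
  if _h : j < subseqs.length ∧ PySem.Str.len (subseqs.getD j "") == 1 then
    run_end subseqs (j + 1)
  else j
termination_by subseqs.length - j
decreasing_by omega

-- j ≤ run_end subseqs j (needed by alt_go's termination)
theorem le_run_end (subseqs : List String) (j : Nat) : j ≤ run_end subseqs j := by
  rw [run_end]
  split
  · have := le_run_end subseqs (j + 1); omega
  · omega
termination_by subseqs.length - j
decreasing_by omega

-- port of Source B's main while-loop over the index i
def alt_go (subseqs : List String) (i : Nat) (new : List String) : List String :=
  if _h : i < subseqs.length then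
    let s := subseqs.getD i ""
    if PySem.Str.len s == 1 then
      let j := run_end subseqs (i + 1)
      alt_go subseqs j
        (new ++ [PySem.Str.lower (PySem.Str.join "" (PySem.List.slice subseqs (some (i : Int)) (some (j : Int))))])
    else
      alt_go subseqs (i + 1) (new ++ [s])
  else new
termination_by subseqs.length - i
decreasing_by
  · have := le_run_end subseqs (i + 1); omega
  · omega

def merge_single_bases_py_alt (subseqs : List String) : List String :=
  alt_go subseqs 0 []

-- ===== PRECONDITION & SPEC =====
def Spec_merge_single_bases_py (subseqs : List String) (out : List String) : Prop := out = merge_single_bases_py_alt subseqs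
instance (subseqs : List String) (out : List String) : Decidable (Spec_merge_single_bases_py subseqs out) := by unfold Spec_merge_single_bases_py; infer_instance

-- ===== CLAIM (what is proved, stated in full; the proofs are below) =====
def Claim_equal_merge_single_bases_py : Prop := ∀ (subseqs : List String), Dom_merge_single_bases_py subseqs → Spec_merge_single_bases_py subseqs (merge_single_bases_py subseqs)

-- ===== LEMMAS AND PROOFS =====

-- the run predicate: a single-character element
def pSingle (s : String) : Bool := PySem.Str.len s == 1

-- the merged result with a pending run `curr` and remaining input `l`
def mergeAux : String → List String → List String
  | curr, [] => if curr ≠ "" then [PySem.Str.lower curr] else []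
  | curr, s :: rest =>
    if pSingle s then mergeAux (curr ++ s) rest
    else if curr ≠ "" then PySem.Str.lower curr :: s :: mergeAux "" rest
    else s :: mergeAux "" rest

theorem str_ext {a b : String} (h : a.toList = b.toList) : a = b := by
  have := congrArg String.ofList h; simpa using this

theorem join_nil : PySem.Str.join "" ([] : List String) = "" := by
  apply str_ext; simp [PySem.Chars.join, List.intercalate]

theorem chars_join_cons (x : List Char) (l : List (List Char)) :
    PySem.Chars.join [] (x :: l) = x ++ PySem.Chars.join [] l := by
  cases l <;> simp [PySem.Chars.join, List.intercalate]

theorem join_cons (a : String) (l : List String) :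
    PySem.Str.join "" (a :: l) = a ++ PySem.Str.join "" l := by
  apply str_ext; simp [chars_join_cons]

theorem ne_empty_of_single {s : String} (h : pSingle s) : s ≠ "" := by
  intro e; subst e; simp [pSingle] at h

theorem append_ne_empty (curr s : String) (hs : s ≠ "") : curr ++ s ≠ "" := by
  intro e
  have := congrArg String.toList e
  simp at this
  exact hs this.2

theorem empty_append (s : String) : "" ++ s = s := by
  apply str_ext; simp

theorem append_empty (s : String) : s ++ "" = s := by
  apply str_ext; simp

theorem string_append_assoc (a b c : String) : a ++ b ++ c = a ++ (b ++ c) := by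
  apply str_ext; simp

-- A's fold-with-flush computes mergeAux
theorem foldA_eq (l : List String) : ∀ (new : List String) (curr : String),
    (if (l.foldl
          (fun (st : List String × String) each =>
            if PySem.Str.len each == 1 then (st.1, st.2 ++ each)
            else (((if st.2 ≠ "" then st.1 ++ [PySem.Str.lower st.2] else st.1) ++ [each]), ""))
          (new, curr)).2 ≠ ""
      then (l.foldl
          (fun (st : List String × String) each =>
            if PySem.Str.len each == 1 then (st.1, st.2 ++ each)
            else (((if st.2 ≠ "" then st.1 ++ [PySem.Str.lower st.2] else st.1) ++ [each]), ""))
          (new, curr)).1 ++ [PySem.Str.lower (l.foldl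
          (fun (st : List String × String) each =>
            if PySem.Str.len each == 1 then (st.1, st.2 ++ each)
            else (((if st.2 ≠ "" then st.1 ++ [PySem.Str.lower st.2] else st.1) ++ [each]), ""))
          (new, curr)).2]
      else (l.foldl
          (fun (st : List String × String) each =>
            if PySem.Str.len each == 1 then (st.1, st.2 ++ each)
            else (((if st.2 ≠ "" then st.1 ++ [PySem.Str.lower st.2] else st.1) ++ [each]), ""))
          (new, curr)).1) = new ++ mergeAux curr l := by
  induction l with
  | nil =>
    intro new curr
    simp only [List.foldl_nil, mergeAux]
    split <;> simp
  | cons s rest ih =>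
    intro new curr
    simp only [List.foldl_cons]
    by_cases hs : (PySem.Str.len s == 1) = true
    · rw [if_pos hs]
      have hm : mergeAux curr (s :: rest) = mergeAux (curr ++ s) rest := by
        simp only [mergeAux]; rw [if_pos (show pSingle s = true from hs)]
      rw [hm]
      exact ih new (curr ++ s)
    · rw [if_neg hs]
      have hm : mergeAux curr (s :: rest) =
          if curr ≠ "" then PySem.Str.lower curr :: s :: mergeAux "" rest
          else s :: mergeAux "" rest := by
        simp only [mergeAux]; rw [if_neg (show ¬ pSingle s = true from hs)]
      rw [hm]
      by_cases hc : curr ≠ ""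
      · rw [if_pos hc, if_pos hc, ih]
        simp
      · rw [if_neg hc, if_neg hc, ih]
        simp

-- a pending nonempty run absorbs the leading single-character elements and is emitted lowercased
theorem mergeAux_run (l : List String) : ∀ (curr : String), curr ≠ "" →
    mergeAux curr l =
      PySem.Str.lower (curr ++ PySem.Str.join "" (l.takeWhile pSingle)) :: mergeAux "" (l.dropWhile pSingle) := by
  induction l with
  | nil =>
    intro curr hc
    simp only [List.takeWhile_nil, List.dropWhile_nil, mergeAux]
    rw [if_pos hc, join_nil, append_empty]
    simp
  | cons s rest ih =>
    intro curr hc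
    by_cases hs : pSingle s = true
    · rw [List.takeWhile_cons_of_pos hs, List.dropWhile_cons_of_pos hs]
      have hm : mergeAux curr (s :: rest) = mergeAux (curr ++ s) rest := by
        simp only [mergeAux]; rw [if_pos hs]
      rw [hm, ih (curr ++ s) (append_ne_empty curr s (ne_empty_of_single hs))]
      rw [join_cons, string_append_assoc]
    · rw [List.takeWhile_cons_of_neg hs, List.dropWhile_cons_of_neg hs]
      rw [join_nil, append_empty]
      have hm : mergeAux curr (s :: rest) = PySem.Str.lower curr :: s :: mergeAux "" rest := by
        simp only [mergeAux]; rw [if_neg hs, if_pos hc]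
      have hm2 : mergeAux "" (s :: rest) = s :: mergeAux "" rest := by
        simp only [mergeAux]; rw [if_neg hs, if_neg (by simp)]
      rw [hm, hm2]

theorem run_end_spec (subseqs : List String) (j : Nat) (hj : j ≤ subseqs.length) :
    run_end subseqs j = j + ((subseqs.drop j).takeWhile pSingle).length := by
  rw [run_end]
  split
  · rename_i h
    obtain ⟨hlt, hone⟩ := h
    rw [List.getD_eq_getElem _ _ hlt] at hone
    have hdrop : subseqs.drop j = subseqs[j] :: subseqs.drop (j + 1) :=
      List.drop_eq_getElem_cons hlt
    rw [hdrop, List.takeWhile_cons_of_pos (show pSingle subseqs[j] = true from hone)]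
    rw [run_end_spec subseqs (j + 1) (by omega)]
    simp; omega
  · rename_i h
    by_cases hlt : j < subseqs.length
    · have hdrop : subseqs.drop j = subseqs[j] :: subseqs.drop (j + 1) :=
        List.drop_eq_getElem_cons hlt
      have hone : ¬ (PySem.Str.len (subseqs.getD j "") == 1) = true := fun hcon => h ⟨hlt, hcon⟩
      rw [List.getD_eq_getElem _ _ hlt] at hone
      rw [hdrop, List.takeWhile_cons_of_neg (show ¬ pSingle subseqs[j] = true from hone)]
      simp
    · have : subseqs.drop j = [] := List.drop_eq_nil_of_le (by omega)
      simp [this]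
termination_by subseqs.length - j
decreasing_by omega

theorem drop_takeWhile_length (l : List String) (p : String → Bool) :
    l.drop (l.takeWhile p).length = l.dropWhile p := by
  have h : l.takeWhile p ++ l.dropWhile p = l := List.takeWhile_append_dropWhile
  calc l.drop (l.takeWhile p).length
      = (l.takeWhile p ++ l.dropWhile p).drop (l.takeWhile p).length := by rw [h]
    _ = l.dropWhile p := List.drop_left

theorem slice_nat (xs : List String) (i j : Nat) (hij : i ≤ j) (hjn : j ≤ xs.length) :
    PySem.List.slice xs (some (i : Int)) (some (j : Int)) = (xs.drop i).take (j - i) := by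
  rw [PySem.List.slice_of_nonneg] <;> simp <;> omega

theorem alt_go_eq (subseqs : List String) (i : Nat) (new : List String) (hi : i ≤ subseqs.length) :
    alt_go subseqs i new = new ++ mergeAux "" (subseqs.drop i) := by
  rw [alt_go]
  split
  · rename_i hlt
    have hdrop : subseqs.drop i = subseqs.getD i "" :: subseqs.drop (i + 1) := by
      rw [List.getD_eq_getElem _ _ hlt]
      exact List.drop_eq_getElem_cons hlt
    by_cases hone : (PySem.Str.len (subseqs.getD i "") == 1) = true
    · rw [if_pos hone]
      have hsingle : pSingle (subseqs.getD i "") = true := hone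
      have hi1 : i + 1 ≤ subseqs.length := by omega
      have hre : run_end subseqs (i + 1) =
          (i + 1) + ((subseqs.drop (i + 1)).takeWhile pSingle).length :=
        run_end_spec subseqs (i + 1) hi1
      have htwlen : ((subseqs.drop (i + 1)).takeWhile pSingle).length ≤ subseqs.length - (i + 1) := by
        have := ((subseqs.drop (i + 1)).takeWhile_prefix pSingle).length_le
        simp only [List.length_drop] at this
        omega
      have hj : run_end subseqs (i + 1) ≤ subseqs.length := by omega
      have hij : i ≤ run_end subseqs (i + 1) := by omega
      have hslice : PySem.List.slice subseqs (some (i : Int)) (some ((run_end subseqs (i + 1)) : Int))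
          = subseqs.getD i "" :: (subseqs.drop (i + 1)).takeWhile pSingle := by
        rw [slice_nat subseqs i _ hij hj, hdrop, hre]
        have he : (i + 1) + ((subseqs.drop (i + 1)).takeWhile pSingle).length - i
            = ((subseqs.drop (i + 1)).takeWhile pSingle).length + 1 := by omega
        rw [he, List.take_succ_cons]
        congr 1
        exact (List.prefix_iff_eq_take.mp ((subseqs.drop (i + 1)).takeWhile_prefix pSingle)).symm
      have hdroprest : subseqs.drop (run_end subseqs (i + 1)) =
          (subseqs.drop (i + 1)).dropWhile pSingle := by
        rw [hre, ← List.drop_drop]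
        exact drop_takeWhile_length _ _
      have hm : mergeAux "" (subseqs.getD i "" :: subseqs.drop (i + 1)) =
          mergeAux (subseqs.getD i "") (subseqs.drop (i + 1)) := by
        rw [mergeAux, if_pos hsingle, String.empty_append]
      rw [alt_go_eq subseqs (run_end subseqs (i + 1)) _ hj]
      rw [hslice, join_cons, hdroprest]
      conv_rhs => rw [hdrop]
      rw [hm, mergeAux_run _ _ (ne_empty_of_single hsingle)]
      simp
    · rw [if_neg hone]
      have hneg : pSingle (subseqs.getD i "") = false := by
        cases h : pSingle (subseqs.getD i "")
        · rfl
        · exact absurd h hone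
      have hm : mergeAux "" (subseqs.getD i "" :: subseqs.drop (i + 1)) =
          subseqs.getD i "" :: mergeAux "" (subseqs.drop (i + 1)) := by
        rw [mergeAux, if_neg (by rw [hneg]; exact Bool.false_ne_true), if_neg (by simp)]
      rw [alt_go_eq subseqs (i + 1) _ (by omega)]
      conv_rhs => rw [hdrop]
      rw [hm]
      simp
  · rename_i hge
    have : subseqs.drop i = [] := List.drop_eq_nil_of_le (by omega)
    simp [this, mergeAux]
termination_by subseqs.length - i
decreasing_by
  · have := le_run_end subseqs (i + 1); omega
  · omega

-- ===== VERDICT (by name: the statement is the Claim_ definition above) =====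
theorem merge_single_bases_py_spec : Claim_equal_merge_single_bases_py := by
  intro subseqs _
  unfold Spec_merge_single_bases_py merge_single_bases_py merge_single_bases_py_alt
  rw [alt_go_eq subseqs 0 [] (by omega)]
  simpa using foldA_eq subseqs [] ""
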